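-- pv_equiv track=rewrite | github.com/archercreat/CTF-Writeups | aeroctf/Babycrypt/solver.py | map_key_rev
-- ===== SOURCE A (Python) =====
-- mapping = {
--     0:0,
--     1:4,
--     2:8,
--     3:12,
--     4:13,
--     5:14,
--     6:15,
--     7:11,
--     8:7,
--     9:3,
--     10:2,
--     11:1,
--     12:5,
--     13:9,
--     14:10,
--     15:6
-- }
--
-- def map_key_rev(key):
--     new_key = [0 for i in range(len(key))]
--     new_mapping = {}
--     for k, v in mapping.items():
--         new_mapping[v] = k
--     for i, v in enumerate(key):
--         new_key[new_mapping[i]] = v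
--     return ''.join(new_key)
-- ===== SOURCE B (Python) =====
-- # Hardcoded source-index permutation (mapping flattened to a list): output j reads key[PERM[j]].
-- PERM = [0, 4, 8, 12, 13, 14, 15, 11, 7, 3, 2, 1, 5, 9, 10, 6]
--
-- def map_key_rev(key):
--     return ''.join([key[p] for p in PERM[:len(key)]])
-- ===== Notes on version B (the rewrite author's own statement) =====
-- stated objective: simpler
-- what changed: B drops the dict entirely: the mapping is flattened to a literal permutation list PERM and the output is gathered in one comprehension key[p] for p in PERM[:len(key)], replacing A's dict-inversion pass plus scatter into a pre-sized mutable list.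
import Mathlib
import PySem

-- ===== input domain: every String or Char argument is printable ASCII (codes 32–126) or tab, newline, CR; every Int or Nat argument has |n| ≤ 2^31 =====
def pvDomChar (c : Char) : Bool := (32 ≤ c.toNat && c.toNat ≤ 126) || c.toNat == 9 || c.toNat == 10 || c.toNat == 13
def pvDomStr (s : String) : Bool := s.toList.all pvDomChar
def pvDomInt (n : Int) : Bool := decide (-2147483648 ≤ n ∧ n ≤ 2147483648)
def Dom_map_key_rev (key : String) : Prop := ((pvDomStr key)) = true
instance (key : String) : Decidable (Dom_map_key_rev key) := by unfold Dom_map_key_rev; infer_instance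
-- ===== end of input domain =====

-- B flattens the mapping dict to a literal permutation list and gathers the output in one pass; equivalence of RETURN values on the lengths where A returns.

-- ===== PORT A =====
-- the module-level 'mapping' dict, in source order
def pvMapping : PySem.Dict Int Int :=
  PySem.Dict.ofList [(0,0),(1,4),(2,8),(3,12),(4,13),(5,14),(6,15),(7,11),
                     (8,7),(9,3),(10,2),(11,1),(12,5),(13,9),(14,10),(15,6)]

def map_key_rev (key : String) : String :=
  let chars := key.toList
  -- new_key = [0 for i in range(len(key))]; the Python int 0 placeholder is a NUL char here;
  -- under Pre_ every slot is overwritten before the join, so the placeholder never reaches the output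
  let newKey : List Char := List.replicate chars.length '\x00'
  -- for k, v in mapping.items(): new_mapping[v] = k
  let newMapping : PySem.Dict Int Int :=
    pvMapping.items.foldl (fun d kv => d.insert kv.2 kv.1) PySem.Dict.empty
  -- for i, v in enumerate(key): new_key[new_mapping[i]] = v   (in-range under Pre_; KeyError/IndexError outside Pre_)
  let newKey := (PySem.List.enumerate chars).foldl
      (fun nk iv => nk.set (newMapping.getD iv.1 0).toNat iv.2) newKey
  String.ofList newKey

-- ===== PORT B =====
-- PERM = [0,4,8,12,13,14,15,11,7,3,2,1,5,9,10,6]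
def pvPerm : List Nat := [0, 4, 8, 12, 13, 14, 15, 11, 7, 3, 2, 1, 5, 9, 10, 6]

def map_key_rev_alt (key : String) : String :=
  -- ''.join([key[p] for p in PERM[:len(key)]])   (every p in range under Pre_)
  String.ofList ((pvPerm.take key.toList.length).map (fun p => key.toList.getD p '\x00'))

-- ===== PRECONDITION & SPEC =====
-- Pre_ excludes exactly the lengths on which A raises (IndexError for 2 ≤ len ≤ 15, KeyError for len ≥ 17); A returns only on lengths 0, 1 and 16.
def Pre_map_key_rev (key : String) : Prop :=
  key.toList.length = 0 ∨ key.toList.length = 1 ∨ key.toList.length = 16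
instance (key : String) : Decidable (Pre_map_key_rev key) := by unfold Pre_map_key_rev; infer_instance
def pvWitness_map_key_rev : String := "0123456789abcdef"

def Spec_map_key_rev (key : String) (out : String) : Prop := out = map_key_rev_alt key
instance (key : String) (out : String) : Decidable (Spec_map_key_rev key out) := by unfold Spec_map_key_rev; infer_instance

-- ===== CLAIM (what is proved, stated in full; the proofs are below) =====
def Claim_equal_map_key_rev : Prop := ∀ (key : String), Dom_map_key_rev key → Pre_map_key_rev key → Spec_map_key_rev key (map_key_rev key)

-- ===== LEMMAS AND PROOFS =====
set_option maxHeartbeats 2000000 in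
theorem pv_agree_len (l : List Char) (h : l.length = 0 ∨ l.length = 1 ∨ l.length = 16) :
    map_key_rev (String.ofList l) = map_key_rev_alt (String.ofList l) := by
  rcases h with h | h | h
  · rw [List.length_eq_zero_iff] at h
    subst h
    simp [map_key_rev, map_key_rev_alt]
  · obtain ⟨a, rfl⟩ := List.length_eq_one_iff.mp h
    simp [map_key_rev, map_key_rev_alt, pvMapping, pvPerm, PySem.Dict.ofList, PySem.Dict.insert,
        PySem.Dict.getD, PySem.Dict.get?, PySem.Dict.empty, PySem.Dict.update, PySem.Dict.contains,
        PySem.List.enumerate, List.find?, List.getD]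
  · rcases l with _ | ⟨x0, l⟩
    · simp at h
    rcases l with _ | ⟨x1, l⟩
    · simp at h
    rcases l with _ | ⟨x2, l⟩
    · simp at h
    rcases l with _ | ⟨x3, l⟩
    · simp at h
    rcases l with _ | ⟨x4, l⟩
    · simp at h
    rcases l with _ | ⟨x5, l⟩
    · simp at h
    rcases l with _ | ⟨x6, l⟩
    · simp at h
    rcases l with _ | ⟨x7, l⟩
    · simp at h
    rcases l with _ | ⟨x8, l⟩
    · simp at h
    rcases l with _ | ⟨x9, l⟩
    · simp at h
    rcases l with _ | ⟨x10, l⟩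
    · simp at h
    rcases l with _ | ⟨x11, l⟩
    · simp at h
    rcases l with _ | ⟨x12, l⟩
    · simp at h
    rcases l with _ | ⟨x13, l⟩
    · simp at h
    rcases l with _ | ⟨x14, l⟩
    · simp at h
    rcases l with _ | ⟨x15, l⟩
    · simp at h
    rcases l with _ | ⟨y, l⟩
    · simp [map_key_rev, map_key_rev_alt, pvMapping, pvPerm, PySem.Dict.ofList, PySem.Dict.insert,
            PySem.Dict.getD, PySem.Dict.get?, PySem.Dict.empty, PySem.Dict.update,
            PySem.Dict.contains, PySem.List.enumerate, List.find?, List.getD]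
    · simp at h

-- ===== VERDICT (by name: the statement is the Claim_ definition above) =====
theorem map_key_rev_spec : Claim_equal_map_key_rev := by
  intro key _ hpre
  unfold Spec_map_key_rev
  have h := pv_agree_len key.toList hpre
  rwa [String.ofList_toList] at h
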